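-- pv_equiv track=rewrite | github.com/skilltester-ai/skilltester | AgentKit/SpecAgent/utils/validate_template_output.py | is_path_dynamic
-- ===== SOURCE A (Python) =====
-- def is_path_dynamic(path: str, dynamic_paths: set[str]) -> bool:
--     """Check if a path is dynamic or has a dynamic parent."""
--     clean_path = path.lstrip("$.")
--     clean_parts = clean_path.split(".") if clean_path else []
--
--     for i in range(len(clean_parts), 0, -1):
--         check_path = ".".join(clean_parts[:i])
--         if check_path in dynamic_paths:
--             return True
--     return False
-- ===== SOURCE B (Python) =====
-- def is_path_dynamic(path: str, dynamic_paths: set[str]) -> bool: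
--     """Check if a path is dynamic or has a dynamic parent."""
--     clean_path = path.lstrip("$.")
--     if not clean_path:
--         return False
--     return any(dp == clean_path or clean_path.startswith(dp + ".")
--                for dp in dynamic_paths)
-- ===== Notes on version B (the rewrite author's own statement) =====
-- stated objective: alternative
-- what changed: B inverts the search direction: instead of splitting the cleaned path into parts and generating each dot-prefix candidate to test for set membership, it makes a single pass over dynamic_paths and tests each entry for being the cleaned path itself or a dot-terminated prefix of it (clean_path.startswith(dp + '.')), so no candidate strings are ever built.
import Mathlib
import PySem

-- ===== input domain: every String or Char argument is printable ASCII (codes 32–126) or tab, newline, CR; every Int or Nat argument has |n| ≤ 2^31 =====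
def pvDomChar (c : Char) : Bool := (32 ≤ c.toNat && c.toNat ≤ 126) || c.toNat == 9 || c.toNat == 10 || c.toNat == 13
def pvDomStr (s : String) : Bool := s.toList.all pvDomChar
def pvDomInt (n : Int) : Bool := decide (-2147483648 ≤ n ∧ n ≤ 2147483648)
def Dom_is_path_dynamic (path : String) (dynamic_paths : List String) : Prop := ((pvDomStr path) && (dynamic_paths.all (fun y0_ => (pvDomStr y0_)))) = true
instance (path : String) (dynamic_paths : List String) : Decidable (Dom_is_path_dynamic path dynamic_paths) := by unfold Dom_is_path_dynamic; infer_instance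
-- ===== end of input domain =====

-- B inverts A's search: instead of generating every dot-prefix of the path and testing set
-- membership, it scans dynamic_paths once and tests each entry for being the cleaned path
-- itself or a dot-terminated prefix of it; objective: alternative (same cost, no split/join).

-- ===== PORT A =====
-- path.lstrip("$.") = drop leading chars from the set {'$','.'}; exact (hand-ported: PySem has no lstrip-with-chars)
def pvLstripDollarDot (path : String) : List Char :=
  path.toList.dropWhile (fun c => c == '$' || c == '.')

-- the 'for i in range(len(clean_parts), 0, -1)' loop with its early return, counting i down
def pvALoop (parts : List (List Char)) (dynamic_paths : List String) : Nat → Bool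
  | 0 => false
  | Nat.succ i =>
    if dynamic_paths.contains (String.ofList (PySem.Chars.join ['.'] (parts.take (i + 1)))) then true
    else pvALoop parts dynamic_paths i

def is_path_dynamic (path : String) (dynamic_paths : List String) : Bool :=
  let clean_path := pvLstripDollarDot path
  let clean_parts := if clean_path.isEmpty then [] else PySem.Chars.splitOn clean_path ['.']
  pvALoop clean_parts dynamic_paths clean_parts.length

-- ===== PORT B =====
def is_path_dynamic_alt (path : String) (dynamic_paths : List String) : Bool :=
  let clean_path := pvLstripDollarDot path
  if clean_path.isEmpty then false
  else dynamic_paths.any (fun dp =>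
    dp.toList == clean_path || PySem.Chars.startswith clean_path (dp.toList ++ ['.']))

-- ===== PRECONDITION & SPEC =====
def Spec_is_path_dynamic (path : String) (dynamic_paths : List String) (out : Bool) : Prop := out = is_path_dynamic_alt path dynamic_paths
instance (path : String) (dynamic_paths : List String) (out : Bool) : Decidable (Spec_is_path_dynamic path dynamic_paths out) := by unfold Spec_is_path_dynamic; infer_instance

-- ===== CLAIM (what is proved, stated in full; the proofs are below) =====
def Claim_equal_is_path_dynamic : Prop := ∀ (path : String) (dynamic_paths : List String), Dom_is_path_dynamic path dynamic_paths → Spec_is_path_dynamic path dynamic_paths (is_path_dynamic path dynamic_paths)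

-- ===== LEMMAS AND PROOFS =====

-- pvSp: a structural description of Python's split(".") used only by the proofs
def pvSp : List Char → List (List Char)
  | [] => [[]]
  | c :: rest =>
    if c = '.' then [] :: pvSp rest
    else
      match pvSp rest with
      | [] => [[c]]
      | p :: ps => (c :: p) :: ps

theorem pvSp_ne_nil (l : List Char) : pvSp l ≠ [] := by
  cases l with
  | nil => simp [pvSp]
  | cons c rest =>
    simp only [pvSp]
    split
    · simp
    · split <;> simp

theorem pvSplitOnGo_eq (fuel : Nat) : ∀ (l cur : List Char) (acc : List (List Char)),
    l.length < fuel →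
    PySem.Chars.splitOn.go ['.'] fuel l cur acc
      = acc.reverse ++ (pvSp l).modifyHead (cur.reverse ++ ·) := by
  induction fuel with
  | zero => intro l cur acc h; omega
  | succ fuel ih =>
    intro l cur acc h
    cases l with
    | nil => simp [PySem.Chars.splitOn.go, pvSp]
    | cons c rest =>
      rw [PySem.Chars.splitOn.go]
      by_cases hc : c = '.'
      · subst hc
        have hp : List.isPrefixOf ['.'] ('.' :: rest) = true := by simp [List.isPrefixOf]
        rw [if_pos hp]
        simp only [List.length_singleton, List.drop_succ_cons, List.drop_zero]
        rw [ih rest [] (cur.reverse :: acc) (by simpa using Nat.lt_of_succ_lt_succ h)]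
        obtain ⟨p, ps, hps⟩ : ∃ p ps, pvSp rest = p :: ps := by
          cases hsp : pvSp rest with
          | nil => exact absurd hsp (pvSp_ne_nil rest)
          | cons p ps => exact ⟨p, ps, rfl⟩
        simp [pvSp, hps]
      · have hp : List.isPrefixOf ['.'] (c :: rest) = false := by
          simp [List.isPrefixOf]
          intro h'; exact absurd h'.symm hc
        rw [if_neg (by simp [hp])]
        rw [ih rest (c :: cur) acc (by simpa using Nat.lt_of_succ_lt_succ h)]
        obtain ⟨p, ps, hps⟩ : ∃ p ps, pvSp rest = p :: ps := by
          cases hsp : pvSp rest with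
          | nil => exact absurd hsp (pvSp_ne_nil rest)
          | cons p ps => exact ⟨p, ps, rfl⟩
        simp [pvSp, hps, if_neg hc]

theorem pvSplitOn_eq (l : List Char) : PySem.Chars.splitOn l ['.'] = pvSp l := by
  rw [PySem.Chars.splitOn, pvSplitOnGo_eq (l.length + 1) l [] [] (Nat.lt_succ_self _)]
  obtain ⟨p, ps, hps⟩ : ∃ p ps, pvSp l = p :: ps := by
    cases hsp : pvSp l with
    | nil => exact absurd hsp (pvSp_ne_nil l)
    | cons p ps => exact ⟨p, ps, rfl⟩
  simp [hps]

theorem pvJoin_cons_head (c : Char) (p : List Char) (ps : List (List Char)) :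
    PySem.Chars.join ['.'] ((c :: p) :: ps) = c :: PySem.Chars.join ['.'] (p :: ps) := by
  cases ps with
  | nil => simp [PySem.Chars.join_singleton]
  | cons q qs => simp [PySem.Chars.join_cons_cons]

theorem pvJoinSp (l : List Char) : PySem.Chars.join ['.'] (pvSp l) = l := by
  induction l with
  | nil => simp [pvSp, PySem.Chars.join_singleton]
  | cons c rest ih =>
    obtain ⟨p, ps, hps⟩ : ∃ p ps, pvSp rest = p :: ps := by
      cases hsp : pvSp rest with
      | nil => exact absurd hsp (pvSp_ne_nil rest)
      | cons p ps => exact ⟨p, ps, rfl⟩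
    by_cases hc : c = '.'
    · subst hc
      have hsp : pvSp ('.' :: rest) = [] :: p :: ps := by rw [pvSp]; simp [hps]
      rw [hsp, PySem.Chars.join_cons_cons]
      rw [hps] at ih
      simpa using ih
    · rw [pvSp]
      simp only [if_neg hc, hps]
      rw [pvJoin_cons_head, ← hps, ih]

-- splitting distributes over a separator occurrence
theorem pvSp_append_dot (x y : List Char) : pvSp (x ++ '.' :: y) = pvSp x ++ pvSp y := by
  induction x with
  | nil => simp [pvSp]
  | cons c x' ih =>
    by_cases hc : c = '.'
    · subst hc
      simp [pvSp, ih]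
    · obtain ⟨p, ps, hps⟩ : ∃ p ps, pvSp x' = p :: ps := by
        cases hsp : pvSp x' with
        | nil => exact absurd hsp (pvSp_ne_nil x')
        | cons p ps => exact ⟨p, ps, rfl⟩
      have hps2 : pvSp (x' ++ '.' :: y) = p :: (ps ++ pvSp y) := by rw [ih, hps]; simp
      simp only [List.cons_append, pvSp, if_neg hc, hps, hps2]

-- join over an append of nonempty lists
theorem pvJoin_append : ∀ (l₁ l₂ : List (List Char)), l₁ ≠ [] → l₂ ≠ [] →
    PySem.Chars.join ['.'] (l₁ ++ l₂)
      = PySem.Chars.join ['.'] l₁ ++ '.' :: PySem.Chars.join ['.'] l₂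
  | [], _, h₁, _ => absurd rfl h₁
  | [a], [], _, h₂ => absurd rfl h₂
  | [a], b :: u, _, _ => by
      simp [PySem.Chars.join_cons_cons, PySem.Chars.join_singleton]
  | a :: b :: u, l₂, _, h₂ => by
      have hrec := pvJoin_append (b :: u) l₂ (by simp) h₂
      simp only [List.cons_append] at hrec ⊢
      rw [PySem.Chars.join_cons_cons, PySem.Chars.join_cons_cons, hrec]
      simp [List.append_assoc]

-- the countdown loop returns true iff some admissible prefix length hits the set
theorem pvALoop_iff (parts : List (List Char)) (dyn : List String) (n : Nat) :
    pvALoop parts dyn n = true ↔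
      ∃ i, 1 ≤ i ∧ i ≤ n ∧
        dyn.contains (String.ofList (PySem.Chars.join ['.'] (parts.take i))) = true := by
  induction n with
  | zero => simp [pvALoop]
  | succ n ih =>
    rw [pvALoop]
    split
    · next h =>
      simp only [true_iff]
      exact ⟨n + 1, by omega, le_refl _, h⟩
    · next h =>
      rw [ih]
      constructor
      · rintro ⟨i, h1, h2, h3⟩; exact ⟨i, h1, by omega, h3⟩
      · rintro ⟨i, h1, h2, h3⟩
        refine ⟨i, h1, ?_, h3⟩
        rcases Nat.lt_succ_iff_lt_or_eq.mp (Nat.lt_succ_of_le h2) with h' | h'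
        · omega
        · subst h'; exact absurd h3 (by simpa using h)

-- the candidates A tests are exactly: the cleaned path, and its dot-terminated prefixes
theorem pvCandidate_iff (clean s : List Char) :
    (∃ i, 1 ≤ i ∧ i ≤ (pvSp clean).length ∧ s = PySem.Chars.join ['.'] ((pvSp clean).take i))
      ↔ (s = clean ∨ (s ++ ['.']) <+: clean) := by
  constructor
  · rintro ⟨i, h1, h2, rfl⟩
    rcases eq_or_lt_of_le h2 with h' | h'
    · left
      rw [h', List.take_length, pvJoinSp]
    · right
      have hsplit : pvSp clean = (pvSp clean).take i ++ (pvSp clean).drop i :=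
        (List.take_append_drop ..).symm
      have hd : (pvSp clean).drop i ≠ [] := by
        intro hcon
        have hlen := congrArg List.length hcon
        simp only [List.length_drop, List.length_nil] at hlen
        omega
      have ht : (pvSp clean).take i ≠ [] := by
        intro hcon
        have hlen := congrArg List.length hcon
        simp only [List.length_take, List.length_nil] at hlen
        omega
      have : clean = PySem.Chars.join ['.'] ((pvSp clean).take i) ++ '.' ::
          PySem.Chars.join ['.'] ((pvSp clean).drop i) := by
        conv_lhs => rw [← pvJoinSp clean, hsplit]
        exact pvJoin_append _ _ ht hd
      refine ⟨PySem.Chars.join ['.'] ((pvSp clean).drop i), ?_⟩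
      conv_rhs => rw [this]
      simp
  · rintro (rfl | ⟨r, hr⟩)
    · refine ⟨(pvSp s).length, ?_, le_refl _, by rw [List.take_length, pvJoinSp]⟩
      have := pvSp_ne_nil s
      cases h : pvSp s with
      | nil => exact absurd h this
      | cons a t => simp [h]
    · have hclean : clean = s ++ '.' :: r := by rw [← hr]; simp
      refine ⟨(pvSp s).length, ?_, ?_, ?_⟩
      · have := pvSp_ne_nil s
        cases h : pvSp s with
        | nil => exact absurd h this
        | cons a t => simp
      · rw [hclean, pvSp_append_dot]
        simp
      · rw [hclean, pvSp_append_dot, List.take_left, pvJoinSp]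

-- ===== VERDICT (by name: the statement is the Claim_ definition above) =====
theorem is_path_dynamic_spec : Claim_equal_is_path_dynamic := by
  intro path dyn _
  unfold Spec_is_path_dynamic is_path_dynamic is_path_dynamic_alt
  cases hc : pvLstripDollarDot path with
  | nil => simp [pvALoop]
  | cons c t =>
    dsimp only
    rw [if_neg (by simp), if_neg (by simp), pvSplitOn_eq]
    rw [Bool.eq_iff_iff, pvALoop_iff, List.any_eq_true]
    constructor
    · rintro ⟨i, h1, h2, h3⟩
      obtain ⟨dp, hdp, hdpeq⟩ : ∃ dp ∈ dyn,
          dp = String.ofList (PySem.Chars.join ['.'] ((pvSp (c :: t)).take i)) := by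
        simpa [List.contains_iff_mem] using h3
      refine ⟨dp, hdp, ?_⟩
      have hcand := (pvCandidate_iff (c :: t)
          (PySem.Chars.join ['.'] ((pvSp (c :: t)).take i))).mp ⟨i, h1, h2, rfl⟩
      have hdl : dp.toList = PySem.Chars.join ['.'] ((pvSp (c :: t)).take i) := by
        rw [hdpeq, String.toList_ofList]
      rcases hcand with h | h
      · simp [hdl, h]
      · have : PySem.Chars.startswith (c :: t) (dp.toList ++ ['.']) = true := by
          rw [PySem.Chars.startswith_iff, hdl]; exact h
        simp [this]
    · rintro ⟨dp, hdp, hpred⟩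
      have hcand : dp.toList = c :: t ∨ (dp.toList ++ ['.']) <+: (c :: t) := by
        simpa [PySem.Chars.startswith_iff] using hpred
      obtain ⟨i, h1, h2, h3⟩ := (pvCandidate_iff (c :: t) dp.toList).mpr hcand
      refine ⟨i, h1, h2, ?_⟩
      rw [← h3, String.ofList_toList]
      simpa [List.contains_iff_mem] using hdp
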